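-- pv_equiv track=rewrite | github.com/Danieloni1/nlp-final-project | python_vocabs.py | create_value_vocab
-- ===== SOURCE A (Python) =====
-- def create_value_vocab(data: dict) -> dict:
--     """
--     Creates a vocabulary of terminals from a file in the format of: {terminal: index}
--     :param data:
--     :return: dict of terminals and their indices.
--     """
--     vocab = {"": 0}
--     counter = 1
--     for rep, name in data.items():
--         if rep:
--             for val1, _, val2 in rep:
--                 if val1 not in vocab:
--                     vocab[val1] = counter
--                     counter += 1
--                 if val2 not in vocab:
--                     vocab[val2] = counter
--                     counter += 1
--         if name not in vocab:
--             vocab[name] = counter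
--             counter += 1
--     return vocab
-- ===== SOURCE B (Python) =====
-- def create_value_vocab(data: dict) -> dict:
--     """
--     Sort-based alternative: flatten to the visited token stream, compute each
--     token's first-occurrence position by overwriting in reverse, then rank the
--     tokens by sorting on those positions.
--     """
--     stream = [""]
--     for rep, name in data.items():
--         if rep:
--             for val1, _, val2 in rep:
--                 stream.append(val1)
--                 stream.append(val2)
--         stream.append(name)
--     first = {}
--     for pos, tok in reversed(list(enumerate(stream))):
--         first[tok] = pos
--     return {tok: i for i, tok in enumerate(sorted(first, key=first.__getitem__))}
-- ===== Notes on version B (the rewrite author's own statement) =====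
-- stated objective: alternative
-- what changed: Replaces A's fused first-seen counter loop by a sort-based ranking: flatten the visited tokens into one stream, compute each token's first-occurrence position with a reverse-order overwrite (no membership tests or counter), and sort the tokens by that position to obtain their indices.
import Mathlib
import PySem

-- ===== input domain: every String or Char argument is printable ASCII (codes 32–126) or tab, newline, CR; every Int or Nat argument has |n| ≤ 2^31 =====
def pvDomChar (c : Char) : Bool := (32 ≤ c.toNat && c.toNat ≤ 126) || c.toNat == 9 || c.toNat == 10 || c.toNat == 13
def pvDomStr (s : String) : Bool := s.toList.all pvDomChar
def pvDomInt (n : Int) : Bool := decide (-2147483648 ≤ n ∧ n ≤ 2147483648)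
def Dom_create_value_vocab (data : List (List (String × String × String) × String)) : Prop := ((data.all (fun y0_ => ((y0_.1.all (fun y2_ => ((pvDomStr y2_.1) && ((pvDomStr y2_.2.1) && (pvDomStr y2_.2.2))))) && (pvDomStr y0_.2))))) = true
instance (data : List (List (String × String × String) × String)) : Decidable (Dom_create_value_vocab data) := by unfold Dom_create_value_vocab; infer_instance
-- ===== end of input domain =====

-- B ranks tokens by sorting on their first-occurrence position in the flat token stream
-- (computed by a reverse-order overwrite), instead of A's fused first-seen counter loop.

-- ===== PORT A =====
def create_value_vocab (data : List (List (String × String × String) × String)) : List (String × Int) :=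
  -- vocab = {"": 0}; counter = 1 (the final 'return vocab' reads off .1.items)
  (data.foldl (fun st p =>
    -- if rep: for val1, _, val2 in rep: …
    let st := if p.1 ≠ [] then
        p.1.foldl (fun st t =>
          let st := if st.1.contains t.1 then st else (st.1.insert t.1 st.2, st.2 + 1)
          if st.1.contains t.2.2 then st else (st.1.insert t.2.2 st.2, st.2 + 1)) st
      else st
    -- if name not in vocab: …
    if st.1.contains p.2 then st else (st.1.insert p.2 st.2, st.2 + 1))
    (PySem.Dict.insert PySem.Dict.empty "" 0, 1)).1.items

-- ===== PORT B =====
def create_value_vocab_alt (data : List (List (String × String × String) × String)) : List (String × Int) :=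
  -- stream = [""]; for rep, name in data.items(): … append …
  let stream := data.foldl (fun s p =>
    let s := if p.1 ≠ [] then p.1.foldl (fun s t => (s ++ [t.1]) ++ [t.2.2]) s else s
    s ++ [p.2]) [""]
  -- first = {}; for pos, tok in reversed(list(enumerate(stream))): first[tok] = pos
  let first := ((PySem.List.enumerate stream 0).reverse).foldl
      (fun d q => d.insert q.2 q.1) (PySem.Dict.empty : PySem.Dict String Int)
  -- {tok: i for i, tok in enumerate(sorted(first, key=first.__getitem__))}
  -- (first[tok] always exists for tok in first; getD with default 0 is exact here)
  (PySem.List.enumerate (PySem.List.sorted first.keys (fun t => first.getD t 0)) 0).map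
      (fun q => (q.2, q.1))

-- ===== PRECONDITION & SPEC =====
def Spec_create_value_vocab (data : List (List (String × String × String) × String)) (out : List (String × Int)) : Prop := out = create_value_vocab_alt data
instance (data : List (List (String × String × String) × String)) (out : List (String × Int)) : Decidable (Spec_create_value_vocab data out) := by unfold Spec_create_value_vocab; infer_instance

-- ===== CLAIM =====
def Claim_equal_create_value_vocab : Prop := ∀ (data : List (List (String × String × String) × String)), Dom_create_value_vocab data → Spec_create_value_vocab data (create_value_vocab data)

-- ===== LEMMAS AND PROOFS =====

-- the flat token stream, in visiting order
def cvvTokens (data : List (List (String × String × String) × String)) : List String :=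
  "" :: data.flatMap (fun p =>
    (if p.1 ≠ [] then p.1.flatMap (fun t => [t.1, t.2.2]) else []) ++ [p.2])

-- the single-token step A performs for each visited token
def cvvStep (st : PySem.Dict String Int × Int) (t : String) : PySem.Dict String Int × Int :=
  if st.1.contains t then st else (st.1.insert t st.2, st.2 + 1)

-- the dict whose items are the indexed list 'seen'
def cvvDictOf (seen : List String) : PySem.Dict String Int :=
  PySem.Dict.mk ((PySem.List.enumerate seen 0).map (fun p => (p.2, p.1)))

lemma cvvKeys_dictOf (seen : List String) : (cvvDictOf seen).keys = seen := by
  simp [cvvDictOf, PySem.Dict.keys, List.map_map]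
  exact PySem.List.map_snd_enumerate seen 0

lemma cvvContains_dictOf (seen : List String) (t : String) :
    (cvvDictOf seen).contains t = decide (t ∈ seen) := by
  rw [PySem.Dict.contains_eq_decide_mem_keys, cvvKeys_dictOf]

lemma cvvStep_dictOf (seen : List String) (t : String) :
    cvvStep (cvvDictOf seen, (seen.length : Int)) t
      = (cvvDictOf (PySem.Set.add seen t), ((PySem.Set.add seen t).length : Int)) := by
  by_cases h : t ∈ seen
  · simp [cvvStep, cvvContains_dictOf, h]
  · have hc : (cvvDictOf seen).contains t = false := by
      simp [cvvContains_dictOf, h]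
    simp only [cvvStep, hc, Bool.false_eq_true, if_false, PySem.Set.add_of_not_mem h]
    rw [Prod.mk.injEq]
    refine ⟨?_, by simp⟩
    apply PySem.Dict.ext
    rw [PySem.Dict.items_insert_of_not_contains _ _ hc]
    simp [cvvDictOf, PySem.List.enumerate_append]

lemma cvvFoldl_step (ts : List String) (seen : List String) :
    ts.foldl cvvStep (cvvDictOf seen, (seen.length : Int))
      = (cvvDictOf (PySem.Set.update seen ts), ((PySem.Set.update seen ts).length : Int)) := by
  induction ts generalizing seen with
  | nil => simp [PySem.Set.update]
  | cons t ts ih =>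
      rw [List.foldl_cons, cvvStep_dictOf, ih, PySem.Set.update_cons]

-- A's nested loops process exactly the flat token stream of one pair
lemma cvvInner (rep : List (String × String × String)) (st : PySem.Dict String Int × Int) :
    rep.foldl (fun st t =>
        let st := if st.1.contains t.1 then st else (st.1.insert t.1 st.2, st.2 + 1)
        if st.1.contains t.2.2 then st else (st.1.insert t.2.2 st.2, st.2 + 1)) st
      = (rep.flatMap (fun t => [t.1, t.2.2])).foldl cvvStep st := by
  induction rep generalizing st with
  | nil => rfl
  | cons t rep ih => simp only [List.foldl_cons, List.flatMap_cons, List.foldl_append, ih]; rfl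

lemma cvvOuter (data : List (List (String × String × String) × String))
    (st : PySem.Dict String Int × Int) :
    data.foldl (fun st p =>
        let st := if p.1 ≠ [] then
            p.1.foldl (fun st t =>
              let st := if st.1.contains t.1 then st else (st.1.insert t.1 st.2, st.2 + 1)
              if st.1.contains t.2.2 then st else (st.1.insert t.2.2 st.2, st.2 + 1)) st
          else st
        if st.1.contains p.2 then st else (st.1.insert p.2 st.2, st.2 + 1)) st
      = (data.flatMap (fun p =>
          (if p.1 ≠ [] then p.1.flatMap (fun t => [t.1, t.2.2]) else []) ++ [p.2])).foldl cvvStep st := by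
  induction data generalizing st with
  | nil => rfl
  | cons p data ih =>
      simp only [List.foldl_cons, List.flatMap_cons, List.foldl_append, ih]
      by_cases h : p.1 = []
      · simp [h, cvvStep]
      · simp only [h, ne_eq, not_false_eq_true, if_pos, cvvInner]
        rfl

-- A computes the canonical first-occurrence indexing of the token stream
lemma cvvA_eq (data : List (List (String × String × String) × String)) :
    create_value_vocab data
      = (PySem.List.enumerate (PySem.List.dedup (cvvTokens data)) 0).map (fun p => (p.2, p.1)) := by
  unfold create_value_vocab
  rw [cvvOuter]
  have hinit : (PySem.Dict.insert PySem.Dict.empty "" 0, (1 : Int))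
      = (cvvDictOf [""], (([""] : List String).length : Int)) := by decide
  rw [hinit, cvvFoldl_step]
  have : PySem.List.dedup (cvvTokens data)
      = PySem.Set.update [""]
          (data.flatMap (fun p =>
            (if p.1 ≠ [] then p.1.flatMap (fun t => [t.1, t.2.2]) else []) ++ [p.2])) := by
    rw [cvvTokens, PySem.List.dedup_eq_ofList, PySem.Set.ofList_eq_foldl, List.foldl_cons]
    rfl
  rw [this]
  rfl

-- B's stream-building loop produces exactly cvvTokens
lemma cvvStream_eq (data : List (List (String × String × String) × String)) :
    data.foldl (fun s p =>
        let s := if p.1 ≠ [] then p.1.foldl (fun s t => (s ++ [t.1]) ++ [t.2.2]) s else s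
        s ++ [p.2]) [""]
      = cvvTokens data := by
  have outer : ∀ (d : List (List (String × String × String) × String)) (s : List String),
      d.foldl (fun s p =>
          let s := if p.1 ≠ [] then p.1.foldl (fun s t => (s ++ [t.1]) ++ [t.2.2]) s else s
          s ++ [p.2]) s
        = s ++ d.flatMap (fun p =>
            (if p.1 ≠ [] then p.1.flatMap (fun t => [t.1, t.2.2]) else []) ++ [p.2]) := by
    intro d
    induction d with
    | nil => simp
    | cons p d ih =>
        intro s
        simp only [List.foldl_cons, List.flatMap_cons, ih]
        by_cases h : p.1 = []
        · simp [h]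
        · simp [h, List.flatMap_def]
  rw [outer]
  rfl

-- the dict built by the reverse-overwrite loop, for an arbitrary enumerate start
def cvvFirst (S : List String) (s : Int) : PySem.Dict String Int :=
  ((PySem.List.enumerate S s).reverse).foldl (fun d q => d.insert q.2 q.1) PySem.Dict.empty

lemma cvvFirst_cons (x : String) (S : List String) (s : Int) :
    cvvFirst (x :: S) s = (cvvFirst S (s + 1)).insert x s := by
  unfold cvvFirst
  rw [PySem.List.enumerate_cons, List.reverse_cons, List.foldl_append]
  rfl

lemma cvvFirst_get? (S : List String) (s : Int) (k : String) :
    (cvvFirst S s).get? k = if k ∈ S then some (s + (S.idxOf k : Int)) else none := by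
  induction S generalizing s with
  | nil => simp [cvvFirst, PySem.List.enumerate_nil]
  | cons x S ih =>
      rw [cvvFirst_cons]
      by_cases hx : k = x
      · subst hx
        simp [PySem.Dict.get?_insert_self, List.idxOf_cons_self]
      · rw [PySem.Dict.get?_insert_of_ne _ _ hx, ih]
        by_cases hm : k ∈ S
        · have hxk : (x == k) = false := beq_eq_false_iff_ne.mpr (Ne.symm hx)
          have : (x :: S).idxOf k = S.idxOf k + 1 := by
            simp [List.idxOf_cons, hxk]
          simp only [hm, if_pos, List.mem_cons, hx, false_or, this]
          push_cast; ring_nf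
        · simp [hm, hx]

lemma cvvFirst_keys (S : List String) (s : Int) :
    (cvvFirst S s).keys = PySem.Set.ofList S.reverse := by
  unfold cvvFirst
  rw [PySem.Dict.keys_foldl_insert_key]
  have hm : ((PySem.List.enumerate S s).reverse).map (·.2) = S.reverse := by
    rw [List.map_reverse, PySem.List.map_snd_enumerate]
  rw [hm]
  rfl

-- first-occurrence indices are strictly increasing along the ordered dedup
lemma cvvPairwise_idxOf (S : List String) :
    (PySem.List.dedup S).Pairwise (fun a b => S.idxOf a < S.idxOf b) := by
  induction S using List.reverseRecOn with
  | nil => simp [PySem.List.dedup]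
  | append_singleton S x ih =>
      have hded : PySem.List.dedup (S ++ [x]) = PySem.Set.add (PySem.List.dedup S) x := by
        simp only [PySem.List.dedup_eq_ofList, PySem.Set.ofList_eq_foldl, List.foldl_append,
          List.foldl_cons, List.foldl_nil]
      have hidx_mem : ∀ a ∈ PySem.List.dedup S, (S ++ [x]).idxOf a = S.idxOf a := by
        intro a ha
        have : a ∈ S := (PySem.List.mem_dedup _ _).mp ha
        exact List.idxOf_append_of_mem this
      rw [hded]
      by_cases hx : x ∈ PySem.List.dedup S
      · rw [PySem.Set.add_of_mem hx]
        exact List.Pairwise.imp_of_mem (fun {a b} ha hb h => by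
          rw [hidx_mem a ha, hidx_mem b hb]; exact h) ih
      · rw [PySem.Set.add_of_not_mem hx]
        rw [List.pairwise_append]
        refine ⟨List.Pairwise.imp_of_mem (fun {a b} ha hb h => by
          rw [hidx_mem a ha, hidx_mem b hb]; exact h) ih, by simp, ?_⟩
        intro a ha b hb
        have hb' : b = x := by simpa using hb
        have haS : a ∈ S := (PySem.List.mem_dedup _ _).mp ha
        have hxS : x ∉ S := fun h => hx ((PySem.List.mem_dedup _ _).mpr h)
        rw [hidx_mem a ha, hb']
        have h1 : S.idxOf a < S.length := List.idxOf_lt_length_of_mem haS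
        have h2 : (S ++ [x]).idxOf x = S.length := by
          rw [List.idxOf_append_of_notMem hxS]; simp
        omega

-- sorting the reverse-overwrite dict's keys by value recovers the ordered dedup
lemma cvvSorted_eq (S : List String) :
    PySem.List.sorted (cvvFirst S 0).keys (fun t => (cvvFirst S 0).getD t 0) false
      = PySem.List.dedup S := by
  apply PySem.List.sorted_eq_of_perm_of_pairwise_lt
  · -- dedup S is a permutation of the keys
    have h1 : (PySem.List.dedup S).Nodup := PySem.List.nodup_dedup S
    have h2 : (cvvFirst S 0).keys.Nodup := by
      rw [cvvFirst_keys]; exact PySem.Set.nodup_ofList _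
    rw [cvvFirst_keys]
    rw [List.perm_ext_iff_of_nodup h1 (PySem.Set.nodup_ofList _)]
    intro a
    rw [PySem.List.mem_dedup, PySem.Set.mem_ofList, List.mem_reverse]
  · -- keys strictly increase along dedup S
    have hget : ∀ t ∈ PySem.List.dedup S, (cvvFirst S 0).getD t 0 = (S.idxOf t : Int) := by
      intro t ht
      have htS : t ∈ S := (PySem.List.mem_dedup _ _).mp ht
      rw [PySem.Dict.getD_eq_get?_getD, cvvFirst_get?]
      simp [htS]
    exact List.Pairwise.imp_of_mem (fun {a b} ha hb h => by
      rw [hget a ha, hget b hb]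
      exact_mod_cast h) (cvvPairwise_idxOf S)

-- ===== VERDICT (by name: the statement is the Claim_ definition above) =====
theorem create_value_vocab_spec : Claim_equal_create_value_vocab := by
  intro data _
  show create_value_vocab data = create_value_vocab_alt data
  rw [cvvA_eq]
  unfold create_value_vocab_alt
  rw [cvvStream_eq]
  show _ = (PySem.List.enumerate
      (PySem.List.sorted (cvvFirst (cvvTokens data) 0).keys
        (fun t => (cvvFirst (cvvTokens data) 0).getD t 0) false) 0).map (fun q => (q.2, q.1))
  rw [cvvSorted_eq]
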